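-- pv_equiv track=rewrite | github.com/rankinbc/AbletonAIAnalysis | projects/music-analyzer/src/smart_fix_generator.py | _classify_stem_type
-- ===== SOURCE A (Python) =====
-- def _classify_stem_type(track_name: str) -> str:
--     """Classify what type of stem this is based on track name."""
--     name_lower = track_name.lower()
--
--     if any(k in name_lower for k in ['kick', 'bd']):
--         return 'kick'
--     if any(k in name_lower for k in ['bass', 'sub']):
--         return 'bass'
--     if any(k in name_lower for k in ['snare', 'clap', 'sd']):
--         return 'snare'
--     if any(k in name_lower for k in ['hat', 'hihat', 'hh']):
--         return 'hihat'
--     if any(k in name_lower for k in ['lead', 'melody']):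
--         return 'lead'
--     if any(k in name_lower for k in ['pad', 'atmo', 'ambient']):
--         return 'pad'
--     if any(k in name_lower for k in ['synth']):
--         return 'synth'
--     if any(k in name_lower for k in ['vocal', 'vox']):
--         return 'vocal'
--     if any(k in name_lower for k in ['drum', 'perc']):
--         return 'drums'
--     if any(k in name_lower for k in ['fx', 'riser', 'impact']):
--         return 'fx'
--
--     return 'other'
-- ===== SOURCE B (Python) =====
-- # B: instead of scanning keywords and substring-searching the name (as A does),
-- # enumerate the name's substrings of keyword lengths (2..7) once and look each up
-- # in a keyword -> branch-priority hash; return the label of the best (smallest)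
-- # priority found, 'other' if none.
--
-- _KW = {
--     'kick': 0, 'bd': 0,
--     'bass': 1, 'sub': 1,
--     'snare': 2, 'clap': 2, 'sd': 2,
--     'hat': 3, 'hihat': 3, 'hh': 3,
--     'lead': 4, 'melody': 4,
--     'pad': 5, 'atmo': 5, 'ambient': 5,
--     'synth': 6,
--     'vocal': 7, 'vox': 7,
--     'drum': 8, 'perc': 8,
--     'fx': 9, 'riser': 9, 'impact': 9,
-- }
--
-- _LABELS = ['kick', 'bass', 'snare', 'hihat', 'lead', 'pad',
--            'synth', 'vocal', 'drums', 'fx', 'other']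
--
-- def _classify_stem_type(track_name: str) -> str:
--     s = track_name.lower()
--     best = 10
--     for i in range(len(s)):
--         for j in range(2, 8):
--             v = _KW.get(s[i:i + j], 10)
--             if v < best:
--                 best = v
--     return _LABELS[best]
-- ===== Notes on version B (the rewrite author's own statement) =====
-- stated objective: alternative
-- what changed: Inverts the search: instead of substring-searching each keyword inside the name as A does, B enumerates the name's substrings of keyword lengths (2-7) once and looks each up in a keyword-to-branch-priority hash, returning the label of the minimum priority found ('other' if none).
import Mathlib
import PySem

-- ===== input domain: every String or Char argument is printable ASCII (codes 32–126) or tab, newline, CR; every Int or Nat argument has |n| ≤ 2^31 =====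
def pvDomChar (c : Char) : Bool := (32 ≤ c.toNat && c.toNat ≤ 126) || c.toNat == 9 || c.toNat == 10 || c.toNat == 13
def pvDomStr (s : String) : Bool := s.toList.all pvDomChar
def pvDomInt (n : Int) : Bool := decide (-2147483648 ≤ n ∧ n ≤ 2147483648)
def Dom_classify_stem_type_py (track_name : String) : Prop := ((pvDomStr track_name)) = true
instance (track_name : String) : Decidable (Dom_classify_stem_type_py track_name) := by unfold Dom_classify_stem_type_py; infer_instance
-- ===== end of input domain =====

-- B inverts the search: A substring-searches each keyword inside the name, B enumerates the
-- name's substrings of keyword lengths (2..7) and looks them up in a keyword->priority hash,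
-- returning the label of the minimum priority found (objective: alternative algorithm).


-- ===== PORT A =====
-- Port of A: the chain of ten explicit if-branches from the Python source.
def classify_stem_type_py (track_name : String) : String :=
  let name_lower := PySem.Str.lower track_name
  if ["kick", "bd"].any (fun k => PySem.Str.isIn k name_lower) then "kick"
  else if ["bass", "sub"].any (fun k => PySem.Str.isIn k name_lower) then "bass"
  else if ["snare", "clap", "sd"].any (fun k => PySem.Str.isIn k name_lower) then "snare"
  else if ["hat", "hihat", "hh"].any (fun k => PySem.Str.isIn k name_lower) then "hihat"
  else if ["lead", "melody"].any (fun k => PySem.Str.isIn k name_lower) then "lead"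
  else if ["pad", "atmo", "ambient"].any (fun k => PySem.Str.isIn k name_lower) then "pad"
  else if ["synth"].any (fun k => PySem.Str.isIn k name_lower) then "synth"
  else if ["vocal", "vox"].any (fun k => PySem.Str.isIn k name_lower) then "vocal"
  else if ["drum", "perc"].any (fun k => PySem.Str.isIn k name_lower) then "drums"
  else if ["fx", "riser", "impact"].any (fun k => PySem.Str.isIn k name_lower) then "fx"
  else "other"

-- ===== PORT B =====
-- B-side helpers: the keyword -> branch-priority dict _KW and the label table _LABELS of Source B.
def pvKW : PySem.Dict String Int := PySem.Dict.mk
  [("kick", 0), ("bd", 0), ("bass", 1), ("sub", 1), ("snare", 2), ("clap", 2), ("sd", 2),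
   ("hat", 3), ("hihat", 3), ("hh", 3), ("lead", 4), ("melody", 4),
   ("pad", 5), ("atmo", 5), ("ambient", 5), ("synth", 6), ("vocal", 7), ("vox", 7),
   ("drum", 8), ("perc", 8), ("fx", 9), ("riser", 9), ("impact", 9)]

def pvLabels : List String :=
  ["kick", "bass", "snare", "hihat", "lead", "pad", "synth", "vocal", "drums", "fx", "other"]

-- the two nested loops of Source B: minimum _KW-priority over all substrings s[i:i+j], j in range(2,8)
def pvBest (s : String) : Int :=
  (PySem.List.pyRange 0 (PySem.Str.len s) 1).foldl (fun best i =>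
    (PySem.List.pyRange 2 8 1).foldl (fun best j =>
      let v := pvKW.getD (PySem.Str.slice s (some i) (some (i + j))) 10
      if v < best then v else best) best) 10

def classify_stem_type_py_alt (track_name : String) : String :=
  let s := PySem.Str.lower track_name
  -- _LABELS[best]: best is always 0..10, in range of the 11 labels, so Python never raises here
  (PySem.List.pyGet? pvLabels (pvBest s)).getD ""

-- ===== PRECONDITION & SPEC =====
def Spec_classify_stem_type_py (track_name : String) (out : String) : Prop := out = classify_stem_type_py_alt track_name
instance (track_name : String) (out : String) : Decidable (Spec_classify_stem_type_py track_name out) := by unfold Spec_classify_stem_type_py; infer_instance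

-- ===== CLAIM (what is proved, stated in full; the proofs are below) =====
def Claim_equal_classify_stem_type_py : Prop := ∀ (track_name : String), Dom_classify_stem_type_py track_name → Spec_classify_stem_type_py track_name (classify_stem_type_py track_name)

-- ===== LEMMAS AND PROOFS =====

-- the dict's pairs, for reasoning about lookups
def pvPairs : List (String × Int) :=
  [("kick", 0), ("bd", 0), ("bass", 1), ("sub", 1), ("snare", 2), ("clap", 2), ("sd", 2),
   ("hat", 3), ("hihat", 3), ("hh", 3), ("lead", 4), ("melody", 4),
   ("pad", 5), ("atmo", 5), ("ambient", 5), ("synth", 6), ("vocal", 7), ("vox", 7),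
   ("drum", 8), ("perc", 8), ("fx", 9), ("riser", 9), ("impact", 9)]

-- generic facts about the "running minimum" folds of pvBest
theorem pv_foldl_le_init {α : Type} (g : Int → α → Int) (hg : ∀ b x, g b x ≤ b) :
    ∀ (l : List α) (a : Int), l.foldl g a ≤ a := by
  intro l
  induction l with
  | nil => intro a; simp
  | cons x t ih => intro a; exact le_trans (ih (g a x)) (hg a x)

theorem pv_foldl_keep_or {α : Type} (g : Int → α → Int) (P : Int → Prop) :
    ∀ (l : List α) (a : Int), (∀ b x, x ∈ l → g b x = b ∨ P (g b x)) →
      l.foldl g a = a ∨ P (l.foldl g a) := by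
  intro l
  induction l with
  | nil => intro a _; left; rfl
  | cons x t ih =>
    intro a hstep
    have hx := hstep a x (by simp)
    have ht := ih (g a x) (fun b y hy => hstep b y (by simp [hy]))
    rcases hx with hx | hx
    · simpa [List.foldl_cons, hx] using ht
    · rcases ht with ht | ht
      · right; simpa [List.foldl_cons, ht] using hx
      · right; simpa [List.foldl_cons] using ht

theorem pv_foldl_le_elem {α : Type} (g : Int → α → Int) (hg : ∀ b x, g b x ≤ b)
    {x : α} {c : Int} (hx2 : ∀ b, g b x ≤ c) :
    ∀ (l : List α) (a : Int), x ∈ l → l.foldl g a ≤ c := by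
  intro l
  induction l with
  | nil => intro a h; cases h
  | cons y t ih =>
    intro a h
    rcases List.mem_cons.mp h with rfl | h
    · exact le_trans (pv_foldl_le_init g hg t (g a x)) (hx2 a)
    · exact ih (g a y) h

-- each pair of pvPairs spelled out
theorem pv_pairs_cases (k : String) (v : Int) (hmem : (k, v) ∈ pvPairs) :
    (k = "kick" ∧ v = 0) ∨ (k = "bd" ∧ v = 0) ∨ (k = "bass" ∧ v = 1) ∨ (k = "sub" ∧ v = 1) ∨
    (k = "snare" ∧ v = 2) ∨ (k = "clap" ∧ v = 2) ∨ (k = "sd" ∧ v = 2) ∨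
    (k = "hat" ∧ v = 3) ∨ (k = "hihat" ∧ v = 3) ∨ (k = "hh" ∧ v = 3) ∨
    (k = "lead" ∧ v = 4) ∨ (k = "melody" ∧ v = 4) ∨
    (k = "pad" ∧ v = 5) ∨ (k = "atmo" ∧ v = 5) ∨ (k = "ambient" ∧ v = 5) ∨
    (k = "synth" ∧ v = 6) ∨ (k = "vocal" ∧ v = 7) ∨ (k = "vox" ∧ v = 7) ∨
    (k = "drum" ∧ v = 8) ∨ (k = "perc" ∧ v = 8) ∨
    (k = "fx" ∧ v = 9) ∨ (k = "riser" ∧ v = 9) ∨ (k = "impact" ∧ v = 9) := by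
  simp only [pvPairs, List.mem_cons, List.not_mem_nil, or_false, Prod.mk.injEq] at hmem
  tauto

-- the dict lookup agrees with pvPairs
theorem pv_getD_eq (k : String) (v : Int) (hmem : (k, v) ∈ pvPairs) : pvKW.getD k 10 = v := by
  rcases pv_pairs_cases k v hmem with ⟨rfl, rfl⟩ | ⟨rfl, rfl⟩ | ⟨rfl, rfl⟩ | ⟨rfl, rfl⟩ |
    ⟨rfl, rfl⟩ | ⟨rfl, rfl⟩ | ⟨rfl, rfl⟩ | ⟨rfl, rfl⟩ | ⟨rfl, rfl⟩ | ⟨rfl, rfl⟩ | ⟨rfl, rfl⟩ |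
    ⟨rfl, rfl⟩ | ⟨rfl, rfl⟩ | ⟨rfl, rfl⟩ | ⟨rfl, rfl⟩ | ⟨rfl, rfl⟩ | ⟨rfl, rfl⟩ | ⟨rfl, rfl⟩ |
    ⟨rfl, rfl⟩ | ⟨rfl, rfl⟩ | ⟨rfl, rfl⟩ | ⟨rfl, rfl⟩ | ⟨rfl, rfl⟩ <;> decide

-- every lookup result is either the default 10 or one of the pairs
theorem pv_getD_mem_aux (l : List (String × Int)) (x : String) :
    ((PySem.Dict.mk l).get? x).getD 10 = 10 ∨ (x, ((PySem.Dict.mk l).get? x).getD 10) ∈ l := by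
  induction l with
  | nil => left; rfl
  | cons p t ih =>
    rw [show PySem.Dict.mk (p :: t) = PySem.Dict.mk ((p.1, p.2) :: t) from rfl,
      PySem.Dict.get?_mk_cons]
    by_cases h : p.1 == x
    · right; simp [(beq_iff_eq.mp h).symm]
    · simp only [h, Bool.false_eq_true, if_false]
      rcases ih with ih | ih
      · left; exact ih
      · right; exact List.mem_cons_of_mem _ ih

theorem pv_getD_cases (x : String) : pvKW.getD x 10 = 10 ∨ (x, pvKW.getD x 10) ∈ pvPairs := by
  have := pv_getD_mem_aux
    [("kick", 0), ("bd", 0), ("bass", 1), ("sub", 1), ("snare", 2), ("clap", 2), ("sd", 2),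
     ("hat", 3), ("hihat", 3), ("hh", 3), ("lead", 4), ("melody", 4),
     ("pad", 5), ("atmo", 5), ("ambient", 5), ("synth", 6), ("vocal", 7), ("vox", 7),
     ("drum", 8), ("perc", 8), ("fx", 9), ("riser", 9), ("impact", 9)] x
  simpa [pvKW, pvPairs, PySem.Dict.getD_eq_get?_getD] using this

-- a slice s[i:i+j] with 0 ≤ i, 0 ≤ j is a contiguous substring of s
theorem pv_slice_infix (s : String) (i j : Int) (hi : 0 ≤ i) (hj : 0 ≤ j) :
    (PySem.Str.slice s (some i) (some (i + j))).toList <:+: s.toList := by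
  rw [PySem.Str.toList_slice, PySem.Chars.slice_eq_listSlice,
    PySem.List.slice_toNat (ha := hi) (hb := by omega)]
  exact ((s.toList.drop i.toNat).take_prefix _).isInfix.trans (s.toList.drop_suffix i.toNat).isInfix

-- conversely any keyword of length 2..7 occurring in s is hit by the enumeration
theorem pv_infix_slice (s k : String) (hin : PySem.Str.isIn k s = true)
    (h2 : 2 ≤ k.toList.length) (h7 : k.toList.length ≤ 7) :
    ∃ i : Int, 0 ≤ i ∧ i < (s.toList.length : Int) ∧
      ∃ j : Int, 2 ≤ j ∧ j ≤ 7 ∧ PySem.Str.slice s (some i) (some (i + j)) = k := by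
  have hinf : k.toList <:+: s.toList := by
    refine (PySem.Chars.isIn_iff_infix _ _).mp ?_
    simpa using hin
  obtain ⟨p, q, hpq⟩ := hinf
  have hlen : p.length + k.toList.length + q.length = s.toList.length := by
    rw [← hpq]; simp; omega
  refine ⟨(p.length : Int), by positivity, by exact_mod_cast (by omega : p.length < s.toList.length),
    (k.toList.length : Int), by exact_mod_cast h2, by exact_mod_cast h7, ?_⟩
  apply String.toList_inj.mp
  rw [PySem.Str.toList_slice, PySem.Chars.slice_eq_listSlice,
    show ((p.length : Int) + (k.toList.length : Int)) = ((p.length + k.toList.length : Nat) : Int) by push_cast; ring,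
    PySem.List.slice_natCast]
  have hd : s.toList.drop p.length = k.toList ++ q := by rw [← hpq]; simp
  rw [hd]
  simp

-- pvBest s is the least priority of a keyword occurring in s (10 if none occurs)
theorem pv_best_spec (s : String) :
    (∀ k v, (k, v) ∈ pvPairs → PySem.Str.isIn k s = true → pvBest s ≤ v) ∧
    (pvBest s = 10 ∨ ∃ k v, (k, v) ∈ pvPairs ∧ PySem.Str.isIn k s = true ∧ pvBest s = v) := by
  have hlens : ∀ kv ∈ pvPairs, 2 ≤ kv.1.toList.length ∧ kv.1.toList.length ≤ 7 := by decide
  have hdec : ∀ i b j, (fun best j =>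
      let v := pvKW.getD (PySem.Str.slice s (some i) (some (i + j))) 10
      if v < best then v else best) b j ≤ b := by
    intro i b j; dsimp only; split <;> omega
  constructor
  · intro k v hmem hin
    obtain ⟨h2, h7⟩ := hlens _ hmem
    obtain ⟨i, hi0, hilt, j, hj2, hj7, hslice⟩ := pv_infix_slice s k hin h2 h7
    refine pv_foldl_le_elem _ (fun b x => pv_foldl_le_init _ (hdec x) _ b)
      (x := i) (c := v) ?_ _ 10 ?_
    · intro b
      refine pv_foldl_le_elem _ (hdec i) (x := j) (c := v) ?_ _ b ?_
      · intro b'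
        dsimp only
        rw [hslice, pv_getD_eq k v hmem]
        split <;> omega
      · exact PySem.List.mem_pyRange_one.mpr ⟨by omega, by omega⟩
    · refine PySem.List.mem_pyRange_one.mpr ⟨hi0, ?_⟩
      have : (PySem.Str.len s : Int) = (s.toList.length : Int) := by simp
      omega
  · have hP := pv_foldl_keep_or
      (fun best i => (PySem.List.pyRange 2 8 1).foldl (fun best j =>
        let v := pvKW.getD (PySem.Str.slice s (some i) (some (i + j))) 10
        if v < best then v else best) best)
      (fun r => r = 10 ∨ ∃ k v, (k, v) ∈ pvPairs ∧ PySem.Str.isIn k s = true ∧ r = v)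
      (PySem.List.pyRange 0 (PySem.Str.len s) 1) 10 ?_
    · rcases hP with h | h
      · left; exact h
      · rcases h with h | h
        · left; exact h
        · right; exact h
    · intro b i hi_mem
      have hi0 : 0 ≤ i := (PySem.List.mem_pyRange_one.mp hi_mem).1
      have h := pv_foldl_keep_or
        (fun best j =>
          let v := pvKW.getD (PySem.Str.slice s (some i) (some (i + j))) 10
          if v < best then v else best)
        (fun r => r = 10 ∨ ∃ k v, (k, v) ∈ pvPairs ∧ PySem.Str.isIn k s = true ∧ r = v)
        (PySem.List.pyRange 2 8 1) b ?_
      · exact h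
      · intro b' j hj_mem
        have hj2 : 2 ≤ j := (PySem.List.mem_pyRange_one.mp hj_mem).1
        dsimp only
        split
        · right
          rcases pv_getD_cases (PySem.Str.slice s (some i) (some (i + j))) with h10 | hmem
          · left; exact h10
          · right
            refine ⟨_, _, hmem, ?_, rfl⟩
            have hinf := pv_slice_infix s i j hi0 (by omega)
            simpa using (PySem.Chars.isIn_iff_infix _ _).mpr hinf
        · left; rfl

theorem pv_best_eq (s : String) (m : Int) (hm : 0 ≤ m) (hm9 : m ≤ 9)
    (hup : ∃ k, (k, m) ∈ pvPairs ∧ PySem.Str.isIn k s = true)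
    (hlow : ∀ k v, (k, v) ∈ pvPairs → PySem.Str.isIn k s = true → m ≤ v) :
    pvBest s = m := by
  obtain ⟨h1, h2⟩ := pv_best_spec s
  obtain ⟨k, hkm, hkin⟩ := hup
  have hle := h1 k m hkm hkin
  rcases h2 with h10 | ⟨k', v', hmem', hin', heq⟩
  · omega
  · have := hlow k' v' hmem' hin'; omega

theorem pv_best_eq_ten (s : String)
    (hnone : ∀ k v, (k, v) ∈ pvPairs → PySem.Str.isIn k s = false) :
    pvBest s = 10 := by
  rcases (pv_best_spec s).2 with h10 | ⟨k, v, hmem, hin, _⟩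
  · exact h10
  · rw [hnone k v hmem] at hin; cases hin

-- ===== VERDICT (by name: the statement is the Claim_ definition above) =====
theorem classify_stem_type_py_spec : Claim_equal_classify_stem_type_py := by
  intro track_name _
  unfold Spec_classify_stem_type_py classify_stem_type_py classify_stem_type_py_alt
  dsimp only
  by_cases h0 : (["kick", "bd"].any fun k => PySem.Str.isIn k (PySem.Str.lower track_name)) = true
  · have hup : ∃ k, (k, (0 : Int)) ∈ pvPairs ∧ PySem.Str.isIn k (PySem.Str.lower track_name) = true := by
      have hm := h0
      simp only [List.any_cons, List.any_nil, Bool.or_eq_true, Bool.false_eq_true, or_false] at hm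
      rcases hm with h | h
      exacts [⟨"kick", by decide, h⟩, ⟨"bd", by decide, h⟩]
    have hlow : ∀ k v, (k, v) ∈ pvPairs → PySem.Str.isIn k (PySem.Str.lower track_name) = true → (0 : Int) ≤ v := by
      intro k v hmem hin
      rcases pv_pairs_cases k v hmem with ⟨rfl, rfl⟩ | ⟨rfl, rfl⟩ | ⟨rfl, rfl⟩ | ⟨rfl, rfl⟩ | ⟨rfl, rfl⟩ | ⟨rfl, rfl⟩ | ⟨rfl, rfl⟩ | ⟨rfl, rfl⟩ | ⟨rfl, rfl⟩ | ⟨rfl, rfl⟩ | ⟨rfl, rfl⟩ | ⟨rfl, rfl⟩ | ⟨rfl, rfl⟩ | ⟨rfl, rfl⟩ | ⟨rfl, rfl⟩ | ⟨rfl, rfl⟩ | ⟨rfl, rfl⟩ | ⟨rfl, rfl⟩ | ⟨rfl, rfl⟩ | ⟨rfl, rfl⟩ | ⟨rfl, rfl⟩ | ⟨rfl, rfl⟩ | ⟨rfl, rfl⟩ <;>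
        omega
    rw [if_pos h0, pv_best_eq (PySem.Str.lower track_name) 0 (by decide) (by decide) hup hlow]
    decide
  · rw [if_neg h0]
    by_cases h1 : (["bass", "sub"].any fun k => PySem.Str.isIn k (PySem.Str.lower track_name)) = true
    · have hup : ∃ k, (k, (1 : Int)) ∈ pvPairs ∧ PySem.Str.isIn k (PySem.Str.lower track_name) = true := by
        have hm := h1
        simp only [List.any_cons, List.any_nil, Bool.or_eq_true, Bool.false_eq_true, or_false] at hm
        rcases hm with h | h
        exacts [⟨"bass", by decide, h⟩, ⟨"sub", by decide, h⟩]
      have hlow : ∀ k v, (k, v) ∈ pvPairs → PySem.Str.isIn k (PySem.Str.lower track_name) = true → (1 : Int) ≤ v := by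
        intro k v hmem hin
        rcases pv_pairs_cases k v hmem with ⟨rfl, rfl⟩ | ⟨rfl, rfl⟩ | ⟨rfl, rfl⟩ | ⟨rfl, rfl⟩ | ⟨rfl, rfl⟩ | ⟨rfl, rfl⟩ | ⟨rfl, rfl⟩ | ⟨rfl, rfl⟩ | ⟨rfl, rfl⟩ | ⟨rfl, rfl⟩ | ⟨rfl, rfl⟩ | ⟨rfl, rfl⟩ | ⟨rfl, rfl⟩ | ⟨rfl, rfl⟩ | ⟨rfl, rfl⟩ | ⟨rfl, rfl⟩ | ⟨rfl, rfl⟩ | ⟨rfl, rfl⟩ | ⟨rfl, rfl⟩ | ⟨rfl, rfl⟩ | ⟨rfl, rfl⟩ | ⟨rfl, rfl⟩ | ⟨rfl, rfl⟩ <;>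
          first | omega | simp_all
      rw [if_pos h1, pv_best_eq (PySem.Str.lower track_name) 1 (by decide) (by decide) hup hlow]
      decide
    · rw [if_neg h1]
      by_cases h2 : (["snare", "clap", "sd"].any fun k => PySem.Str.isIn k (PySem.Str.lower track_name)) = true
      · have hup : ∃ k, (k, (2 : Int)) ∈ pvPairs ∧ PySem.Str.isIn k (PySem.Str.lower track_name) = true := by
          have hm := h2
          simp only [List.any_cons, List.any_nil, Bool.or_eq_true, Bool.false_eq_true, or_false] at hm
          rcases hm with h | h | h
          exacts [⟨"snare", by decide, h⟩, ⟨"clap", by decide, h⟩, ⟨"sd", by decide, h⟩]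
        have hlow : ∀ k v, (k, v) ∈ pvPairs → PySem.Str.isIn k (PySem.Str.lower track_name) = true → (2 : Int) ≤ v := by
          intro k v hmem hin
          rcases pv_pairs_cases k v hmem with ⟨rfl, rfl⟩ | ⟨rfl, rfl⟩ | ⟨rfl, rfl⟩ | ⟨rfl, rfl⟩ | ⟨rfl, rfl⟩ | ⟨rfl, rfl⟩ | ⟨rfl, rfl⟩ | ⟨rfl, rfl⟩ | ⟨rfl, rfl⟩ | ⟨rfl, rfl⟩ | ⟨rfl, rfl⟩ | ⟨rfl, rfl⟩ | ⟨rfl, rfl⟩ | ⟨rfl, rfl⟩ | ⟨rfl, rfl⟩ | ⟨rfl, rfl⟩ | ⟨rfl, rfl⟩ | ⟨rfl, rfl⟩ | ⟨rfl, rfl⟩ | ⟨rfl, rfl⟩ | ⟨rfl, rfl⟩ | ⟨rfl, rfl⟩ | ⟨rfl, rfl⟩ <;>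
            first | omega | simp_all
        rw [if_pos h2, pv_best_eq (PySem.Str.lower track_name) 2 (by decide) (by decide) hup hlow]
        decide
      · rw [if_neg h2]
        by_cases h3 : (["hat", "hihat", "hh"].any fun k => PySem.Str.isIn k (PySem.Str.lower track_name)) = true
        · have hup : ∃ k, (k, (3 : Int)) ∈ pvPairs ∧ PySem.Str.isIn k (PySem.Str.lower track_name) = true := by
            have hm := h3
            simp only [List.any_cons, List.any_nil, Bool.or_eq_true, Bool.false_eq_true, or_false] at hm
            rcases hm with h | h | h
            exacts [⟨"hat", by decide, h⟩, ⟨"hihat", by decide, h⟩, ⟨"hh", by decide, h⟩]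
          have hlow : ∀ k v, (k, v) ∈ pvPairs → PySem.Str.isIn k (PySem.Str.lower track_name) = true → (3 : Int) ≤ v := by
            intro k v hmem hin
            rcases pv_pairs_cases k v hmem with ⟨rfl, rfl⟩ | ⟨rfl, rfl⟩ | ⟨rfl, rfl⟩ | ⟨rfl, rfl⟩ | ⟨rfl, rfl⟩ | ⟨rfl, rfl⟩ | ⟨rfl, rfl⟩ | ⟨rfl, rfl⟩ | ⟨rfl, rfl⟩ | ⟨rfl, rfl⟩ | ⟨rfl, rfl⟩ | ⟨rfl, rfl⟩ | ⟨rfl, rfl⟩ | ⟨rfl, rfl⟩ | ⟨rfl, rfl⟩ | ⟨rfl, rfl⟩ | ⟨rfl, rfl⟩ | ⟨rfl, rfl⟩ | ⟨rfl, rfl⟩ | ⟨rfl, rfl⟩ | ⟨rfl, rfl⟩ | ⟨rfl, rfl⟩ | ⟨rfl, rfl⟩ <;>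
              first | omega | simp_all
          rw [if_pos h3, pv_best_eq (PySem.Str.lower track_name) 3 (by decide) (by decide) hup hlow]
          decide
        · rw [if_neg h3]
          by_cases h4 : (["lead", "melody"].any fun k => PySem.Str.isIn k (PySem.Str.lower track_name)) = true
          · have hup : ∃ k, (k, (4 : Int)) ∈ pvPairs ∧ PySem.Str.isIn k (PySem.Str.lower track_name) = true := by
              have hm := h4
              simp only [List.any_cons, List.any_nil, Bool.or_eq_true, Bool.false_eq_true, or_false] at hm
              rcases hm with h | h
              exacts [⟨"lead", by decide, h⟩, ⟨"melody", by decide, h⟩]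
            have hlow : ∀ k v, (k, v) ∈ pvPairs → PySem.Str.isIn k (PySem.Str.lower track_name) = true → (4 : Int) ≤ v := by
              intro k v hmem hin
              rcases pv_pairs_cases k v hmem with ⟨rfl, rfl⟩ | ⟨rfl, rfl⟩ | ⟨rfl, rfl⟩ | ⟨rfl, rfl⟩ | ⟨rfl, rfl⟩ | ⟨rfl, rfl⟩ | ⟨rfl, rfl⟩ | ⟨rfl, rfl⟩ | ⟨rfl, rfl⟩ | ⟨rfl, rfl⟩ | ⟨rfl, rfl⟩ | ⟨rfl, rfl⟩ | ⟨rfl, rfl⟩ | ⟨rfl, rfl⟩ | ⟨rfl, rfl⟩ | ⟨rfl, rfl⟩ | ⟨rfl, rfl⟩ | ⟨rfl, rfl⟩ | ⟨rfl, rfl⟩ | ⟨rfl, rfl⟩ | ⟨rfl, rfl⟩ | ⟨rfl, rfl⟩ | ⟨rfl, rfl⟩ <;>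
                first | omega | simp_all
            rw [if_pos h4, pv_best_eq (PySem.Str.lower track_name) 4 (by decide) (by decide) hup hlow]
            decide
          · rw [if_neg h4]
            by_cases h5 : (["pad", "atmo", "ambient"].any fun k => PySem.Str.isIn k (PySem.Str.lower track_name)) = true
            · have hup : ∃ k, (k, (5 : Int)) ∈ pvPairs ∧ PySem.Str.isIn k (PySem.Str.lower track_name) = true := by
                have hm := h5
                simp only [List.any_cons, List.any_nil, Bool.or_eq_true, Bool.false_eq_true, or_false] at hm
                rcases hm with h | h | h
                exacts [⟨"pad", by decide, h⟩, ⟨"atmo", by decide, h⟩, ⟨"ambient", by decide, h⟩]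
              have hlow : ∀ k v, (k, v) ∈ pvPairs → PySem.Str.isIn k (PySem.Str.lower track_name) = true → (5 : Int) ≤ v := by
                intro k v hmem hin
                rcases pv_pairs_cases k v hmem with ⟨rfl, rfl⟩ | ⟨rfl, rfl⟩ | ⟨rfl, rfl⟩ | ⟨rfl, rfl⟩ | ⟨rfl, rfl⟩ | ⟨rfl, rfl⟩ | ⟨rfl, rfl⟩ | ⟨rfl, rfl⟩ | ⟨rfl, rfl⟩ | ⟨rfl, rfl⟩ | ⟨rfl, rfl⟩ | ⟨rfl, rfl⟩ | ⟨rfl, rfl⟩ | ⟨rfl, rfl⟩ | ⟨rfl, rfl⟩ | ⟨rfl, rfl⟩ | ⟨rfl, rfl⟩ | ⟨rfl, rfl⟩ | ⟨rfl, rfl⟩ | ⟨rfl, rfl⟩ | ⟨rfl, rfl⟩ | ⟨rfl, rfl⟩ | ⟨rfl, rfl⟩ <;>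
                  first | omega | simp_all
              rw [if_pos h5, pv_best_eq (PySem.Str.lower track_name) 5 (by decide) (by decide) hup hlow]
              decide
            · rw [if_neg h5]
              by_cases h6 : (["synth"].any fun k => PySem.Str.isIn k (PySem.Str.lower track_name)) = true
              · have hup : ∃ k, (k, (6 : Int)) ∈ pvPairs ∧ PySem.Str.isIn k (PySem.Str.lower track_name) = true := by
                  have hm := h6
                  simp only [List.any_cons, List.any_nil, Bool.or_eq_true, Bool.false_eq_true, or_false] at hm
                  exact ⟨"synth", by decide, hm⟩
                have hlow : ∀ k v, (k, v) ∈ pvPairs → PySem.Str.isIn k (PySem.Str.lower track_name) = true → (6 : Int) ≤ v := by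
                  intro k v hmem hin
                  rcases pv_pairs_cases k v hmem with ⟨rfl, rfl⟩ | ⟨rfl, rfl⟩ | ⟨rfl, rfl⟩ | ⟨rfl, rfl⟩ | ⟨rfl, rfl⟩ | ⟨rfl, rfl⟩ | ⟨rfl, rfl⟩ | ⟨rfl, rfl⟩ | ⟨rfl, rfl⟩ | ⟨rfl, rfl⟩ | ⟨rfl, rfl⟩ | ⟨rfl, rfl⟩ | ⟨rfl, rfl⟩ | ⟨rfl, rfl⟩ | ⟨rfl, rfl⟩ | ⟨rfl, rfl⟩ | ⟨rfl, rfl⟩ | ⟨rfl, rfl⟩ | ⟨rfl, rfl⟩ | ⟨rfl, rfl⟩ | ⟨rfl, rfl⟩ | ⟨rfl, rfl⟩ | ⟨rfl, rfl⟩ <;>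
                    first | omega | simp_all
                rw [if_pos h6, pv_best_eq (PySem.Str.lower track_name) 6 (by decide) (by decide) hup hlow]
                decide
              · rw [if_neg h6]
                by_cases h7 : (["vocal", "vox"].any fun k => PySem.Str.isIn k (PySem.Str.lower track_name)) = true
                · have hup : ∃ k, (k, (7 : Int)) ∈ pvPairs ∧ PySem.Str.isIn k (PySem.Str.lower track_name) = true := by
                    have hm := h7
                    simp only [List.any_cons, List.any_nil, Bool.or_eq_true, Bool.false_eq_true, or_false] at hm
                    rcases hm with h | h
                    exacts [⟨"vocal", by decide, h⟩, ⟨"vox", by decide, h⟩]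
                  have hlow : ∀ k v, (k, v) ∈ pvPairs → PySem.Str.isIn k (PySem.Str.lower track_name) = true → (7 : Int) ≤ v := by
                    intro k v hmem hin
                    rcases pv_pairs_cases k v hmem with ⟨rfl, rfl⟩ | ⟨rfl, rfl⟩ | ⟨rfl, rfl⟩ | ⟨rfl, rfl⟩ | ⟨rfl, rfl⟩ | ⟨rfl, rfl⟩ | ⟨rfl, rfl⟩ | ⟨rfl, rfl⟩ | ⟨rfl, rfl⟩ | ⟨rfl, rfl⟩ | ⟨rfl, rfl⟩ | ⟨rfl, rfl⟩ | ⟨rfl, rfl⟩ | ⟨rfl, rfl⟩ | ⟨rfl, rfl⟩ | ⟨rfl, rfl⟩ | ⟨rfl, rfl⟩ | ⟨rfl, rfl⟩ | ⟨rfl, rfl⟩ | ⟨rfl, rfl⟩ | ⟨rfl, rfl⟩ | ⟨rfl, rfl⟩ | ⟨rfl, rfl⟩ <;>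
                      first | omega | simp_all
                  rw [if_pos h7, pv_best_eq (PySem.Str.lower track_name) 7 (by decide) (by decide) hup hlow]
                  decide
                · rw [if_neg h7]
                  by_cases h8 : (["drum", "perc"].any fun k => PySem.Str.isIn k (PySem.Str.lower track_name)) = true
                  · have hup : ∃ k, (k, (8 : Int)) ∈ pvPairs ∧ PySem.Str.isIn k (PySem.Str.lower track_name) = true := by
                      have hm := h8
                      simp only [List.any_cons, List.any_nil, Bool.or_eq_true, Bool.false_eq_true, or_false] at hm
                      rcases hm with h | h
                      exacts [⟨"drum", by decide, h⟩, ⟨"perc", by decide, h⟩]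
                    have hlow : ∀ k v, (k, v) ∈ pvPairs → PySem.Str.isIn k (PySem.Str.lower track_name) = true → (8 : Int) ≤ v := by
                      intro k v hmem hin
                      rcases pv_pairs_cases k v hmem with ⟨rfl, rfl⟩ | ⟨rfl, rfl⟩ | ⟨rfl, rfl⟩ | ⟨rfl, rfl⟩ | ⟨rfl, rfl⟩ | ⟨rfl, rfl⟩ | ⟨rfl, rfl⟩ | ⟨rfl, rfl⟩ | ⟨rfl, rfl⟩ | ⟨rfl, rfl⟩ | ⟨rfl, rfl⟩ | ⟨rfl, rfl⟩ | ⟨rfl, rfl⟩ | ⟨rfl, rfl⟩ | ⟨rfl, rfl⟩ | ⟨rfl, rfl⟩ | ⟨rfl, rfl⟩ | ⟨rfl, rfl⟩ | ⟨rfl, rfl⟩ | ⟨rfl, rfl⟩ | ⟨rfl, rfl⟩ | ⟨rfl, rfl⟩ | ⟨rfl, rfl⟩ <;>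
                        first | omega | simp_all
                    rw [if_pos h8, pv_best_eq (PySem.Str.lower track_name) 8 (by decide) (by decide) hup hlow]
                    decide
                  · rw [if_neg h8]
                    by_cases h9 : (["fx", "riser", "impact"].any fun k => PySem.Str.isIn k (PySem.Str.lower track_name)) = true
                    · have hup : ∃ k, (k, (9 : Int)) ∈ pvPairs ∧ PySem.Str.isIn k (PySem.Str.lower track_name) = true := by
                        have hm := h9
                        simp only [List.any_cons, List.any_nil, Bool.or_eq_true, Bool.false_eq_true, or_false] at hm
                        rcases hm with h | h | h
                        exacts [⟨"fx", by decide, h⟩, ⟨"riser", by decide, h⟩, ⟨"impact", by decide, h⟩]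
                      have hlow : ∀ k v, (k, v) ∈ pvPairs → PySem.Str.isIn k (PySem.Str.lower track_name) = true → (9 : Int) ≤ v := by
                        intro k v hmem hin
                        rcases pv_pairs_cases k v hmem with ⟨rfl, rfl⟩ | ⟨rfl, rfl⟩ | ⟨rfl, rfl⟩ | ⟨rfl, rfl⟩ | ⟨rfl, rfl⟩ | ⟨rfl, rfl⟩ | ⟨rfl, rfl⟩ | ⟨rfl, rfl⟩ | ⟨rfl, rfl⟩ | ⟨rfl, rfl⟩ | ⟨rfl, rfl⟩ | ⟨rfl, rfl⟩ | ⟨rfl, rfl⟩ | ⟨rfl, rfl⟩ | ⟨rfl, rfl⟩ | ⟨rfl, rfl⟩ | ⟨rfl, rfl⟩ | ⟨rfl, rfl⟩ | ⟨rfl, rfl⟩ | ⟨rfl, rfl⟩ | ⟨rfl, rfl⟩ | ⟨rfl, rfl⟩ | ⟨rfl, rfl⟩ <;>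
                          first | omega | simp_all
                      rw [if_pos h9, pv_best_eq (PySem.Str.lower track_name) 9 (by decide) (by decide) hup hlow]
                      decide
                    · rw [if_neg h9]
                      have hnone : ∀ k v, (k, v) ∈ pvPairs → PySem.Str.isIn k (PySem.Str.lower track_name) = false := by
                        intro k v hmem
                        rcases pv_pairs_cases k v hmem with ⟨rfl, rfl⟩ | ⟨rfl, rfl⟩ | ⟨rfl, rfl⟩ | ⟨rfl, rfl⟩ | ⟨rfl, rfl⟩ | ⟨rfl, rfl⟩ | ⟨rfl, rfl⟩ | ⟨rfl, rfl⟩ | ⟨rfl, rfl⟩ | ⟨rfl, rfl⟩ | ⟨rfl, rfl⟩ | ⟨rfl, rfl⟩ | ⟨rfl, rfl⟩ | ⟨rfl, rfl⟩ | ⟨rfl, rfl⟩ | ⟨rfl, rfl⟩ | ⟨rfl, rfl⟩ | ⟨rfl, rfl⟩ | ⟨rfl, rfl⟩ | ⟨rfl, rfl⟩ | ⟨rfl, rfl⟩ | ⟨rfl, rfl⟩ | ⟨rfl, rfl⟩ <;> simp_all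
                      rw [pv_best_eq_ten (PySem.Str.lower track_name) hnone]
                      decide
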